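-- pv_equiv track=rewrite | github.com/codeshuttler/CangjieTranslator | scripts/rq1/check_test_results.py | merge_exception_lines
-- ===== SOURCE A (Python) =====
-- def merge_exception_lines(log_lines: list[str]) -> list[str]:
--     merged_lines = []
--     temp_line = ""
--
--     for line in log_lines:
--         if "<Exception>" in line:
--             if temp_line:
--                 temp_line += " " + line.strip()  # Merge with the previous exception line
--             else:
--                 temp_line = line.strip()  # Start a new exception block
--         else:
--             if temp_line:
--                 merged_lines.append(temp_line)  # Append the merged exception block
--                 temp_line = ""
--             merged_lines.append(line.strip())  # Append the non-exception line
--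
--     if temp_line:
--         merged_lines.append(temp_line)  # Append the last exception block if exists
--
--     return merged_lines
-- ===== SOURCE B (Python) =====
-- def merge_exception_lines(log_lines: list[str]) -> list[str]:
--     # Run-based rewrite: split the input into maximal runs of exception lines
--     # up front, join each run with " ".join, emit other lines one by one --
--     # no temp_line accumulator, no final flush.
--     def is_exc(line):
--         return "<Exception>" in line
--
--     merged = []
--     i = 0
--     n = len(log_lines)
--     while i < n:
--         if is_exc(log_lines[i]):
--             j = i
--             while j < n and is_exc(log_lines[j]):
--                 j += 1
--             merged.append(" ".join(line.strip() for line in log_lines[i:j]))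
--             i = j
--         else:
--             merged.append(log_lines[i].strip())
--             i += 1
--     return merged
-- ===== Notes on version B (the rewrite author's own statement) =====
-- stated objective: alternative
-- what changed: Replaces A's temp_line accumulator with its flush-before-append and final flush by a run-based scan: split off each maximal prefix of exception lines and emit it as one ' '.join of the stripped lines, emitting non-exception lines individually.
import Mathlib
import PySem

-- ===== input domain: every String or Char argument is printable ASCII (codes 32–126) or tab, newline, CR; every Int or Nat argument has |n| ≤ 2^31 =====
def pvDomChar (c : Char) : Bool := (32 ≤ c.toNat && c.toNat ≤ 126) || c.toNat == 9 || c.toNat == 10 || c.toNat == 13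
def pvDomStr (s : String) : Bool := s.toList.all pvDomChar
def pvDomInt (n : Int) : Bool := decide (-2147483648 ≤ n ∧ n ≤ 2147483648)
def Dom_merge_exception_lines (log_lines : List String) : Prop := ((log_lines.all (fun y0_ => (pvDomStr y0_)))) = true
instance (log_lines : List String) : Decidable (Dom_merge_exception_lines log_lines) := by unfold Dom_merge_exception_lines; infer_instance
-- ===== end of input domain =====

-- B replaces A's temp_line accumulator + final flush by splitting the input into
-- maximal runs of exception lines and joining each run (objective: alternative).


-- ===== PORT A =====
-- '"<Exception>" in line'
def pvExc (line : String) : Bool := PySem.Chars.isIn "<Exception>".toList line.toList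

-- 'line.strip()' as a list of chars (string concatenation is done on List Char,
-- which is kernel-transparent; strings are rebuilt with String.mk on append)
def pvStrips (line : String) : List Char := PySem.Chars.strip line.toList

-- the body of A's for-loop; state = (merged_lines, temp_line)
def pvStepA (st : List String × List Char) (line : String) : List String × List Char :=
  if pvExc line then
    if st.2 ≠ [] then (st.1, st.2 ++ ' ' :: pvStrips line)   -- temp_line += " " + line.strip()
    else (st.1, pvStrips line)                               -- temp_line = line.strip()
  else
    if st.2 ≠ [] then (st.1 ++ [String.mk st.2, String.mk (pvStrips line)], [])
    else (st.1 ++ [String.mk (pvStrips line)], [])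

-- the final 'if temp_line: merged_lines.append(temp_line)'
def pvFinish (r : List String × List Char) : List String :=
  if r.2 ≠ [] then r.1 ++ [String.mk r.2] else r.1

def merge_exception_lines (log_lines : List String) : List String :=
  pvFinish (log_lines.foldl pvStepA ([], []))

-- ===== PORT B =====
-- the while-loop of Source B: rest[:k] / rest[k:] with k = length of the maximal
-- exception-line prefix are takeWhile / dropWhile
def pvAltGo : List String → List String
  | [] => []
  | x :: xs =>
    if h : pvExc x then
      String.mk (PySem.Chars.join [' '] (((x :: xs).takeWhile pvExc).map pvStrips))
        :: pvAltGo ((x :: xs).dropWhile pvExc)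
    else
      String.mk (pvStrips x) :: pvAltGo xs
termination_by l => l.length
decreasing_by
  · simp only [List.dropWhile_cons, h, if_true, List.length_cons]
    have := List.length_dropWhile_le pvExc xs
    omega
  · simp only [List.length_cons]; omega

def merge_exception_lines_alt (log_lines : List String) : List String := pvAltGo log_lines

-- ===== PRECONDITION & SPEC =====
def Spec_merge_exception_lines (log_lines : List String) (out : List String) : Prop := out = merge_exception_lines_alt log_lines
instance (log_lines : List String) (out : List String) : Decidable (Spec_merge_exception_lines log_lines out) := by unfold Spec_merge_exception_lines; infer_instance

-- ===== CLAIM (what is proved, stated in full; the proofs are below) =====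
def Claim_equal_merge_exception_lines : Prop := ∀ (log_lines : List String), Dom_merge_exception_lines log_lines → Spec_merge_exception_lines log_lines (merge_exception_lines log_lines)

-- ===== LEMMAS AND PROOFS =====

-- stripping a line that contains "<Exception>" cannot give the empty string
lemma pv_strip_ne_nil_of_exc (x : String) (h : pvExc x = true) : pvStrips x ≠ [] := by
  have hinf : "<Exception>".toList <:+: x.toList := (PySem.Chars.isIn_iff_infix _ _).mp h
  have hlt : '<' ∈ x.toList := hinf.mem (by decide)
  intro hnil
  have hall : ∀ c ∈ x.toList, PySem.Chars.isspace c = true := by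
    intro c hc
    have hsplit := List.takeWhile_append_dropWhile (p := PySem.Chars.isspace) (l := x.toList)
    have hdw : ∀ c ∈ x.toList.dropWhile PySem.Chars.isspace, PySem.Chars.isspace c = true := by
      have h2 : (x.toList.dropWhile PySem.Chars.isspace).reverse.dropWhile PySem.Chars.isspace = [] := by
        have : ((x.toList.dropWhile PySem.Chars.isspace).reverse.dropWhile PySem.Chars.isspace).reverse = [] := hnil
        simpa using congrArg List.reverse this
      intro c hc'
      exact List.dropWhile_eq_nil_iff.mp h2 c (List.mem_reverse.mpr hc')
    rw [← hsplit] at hc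
    rcases List.mem_append.mp hc with h1 | h2
    · exact List.mem_takeWhile_imp h1
    · exact hdw c h2
  have := hall '<' hlt
  simp [PySem.Chars.isspace] at this

-- gluing one more stripped line onto a partially-joined run
lemma pv_join_glue (t s : List Char) (rest : List (List Char)) :
    PySem.Chars.join [' '] ((t ++ ' ' :: s) :: rest)
      = t ++ ' ' :: PySem.Chars.join [' '] (s :: rest) := by
  cases rest with
  | nil => simp [PySem.Chars.join_singleton]
  | cons r rs =>
      rw [PySem.Chars.join_cons_cons, PySem.Chars.join_cons_cons]
      simp

-- the invariant of A's loop: with empty temp_line the fold computes pvAltGo;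
-- with a nonempty temp_line it finishes the current exception run first
lemma pv_main : ∀ (n : Nat) (xs : List String), xs.length ≤ n →
    (∀ acc, pvFinish (xs.foldl pvStepA (acc, [])) = acc ++ pvAltGo xs) ∧
    (∀ acc t, t ≠ [] → pvFinish (xs.foldl pvStepA (acc, t)) =
        acc ++ (String.mk (PySem.Chars.join [' '] (t :: (xs.takeWhile pvExc).map pvStrips))
                  :: pvAltGo (xs.dropWhile pvExc))) := by
  intro n
  induction n with
  | zero =>
      intro xs hxs
      have : xs = [] := List.eq_nil_of_length_eq_zero (Nat.le_zero.mp hxs)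
      subst this
      constructor
      · intro acc; simp [pvFinish, pvAltGo]
      · intro acc t ht
        simp [pvFinish, ht, pvAltGo, PySem.Chars.join_singleton]
  | succ n ih =>
      intro xs hxs
      cases xs with
      | nil =>
          constructor
          · intro acc; simp [pvFinish, pvAltGo]
          · intro acc t ht
            simp [pvFinish, ht, pvAltGo, PySem.Chars.join_singleton]
      | cons x xs' =>
          have hlen : xs'.length ≤ n := by simp only [List.length_cons] at hxs; omega
          constructor
          · intro acc
            by_cases h : pvExc x = true
            · have hstep : pvStepA (acc, []) x = (acc, pvStrips x) := by
                simp [pvStepA, h]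
              rw [List.foldl_cons, hstep,
                  (ih xs' hlen).2 acc (pvStrips x) (pv_strip_ne_nil_of_exc x h)]
              simp [pvAltGo, h]
            · have hstep : pvStepA (acc, []) x = (acc ++ [String.mk (pvStrips x)], []) := by
                simp [pvStepA, h]
              rw [List.foldl_cons, hstep, (ih xs' hlen).1 (acc ++ [String.mk (pvStrips x)])]
              simp [pvAltGo, h]
          · intro acc t ht
            by_cases h : pvExc x = true
            · have hstep : pvStepA (acc, t) x = (acc, t ++ ' ' :: pvStrips x) := by
                simp [pvStepA, h, ht]
              rw [List.foldl_cons, hstep,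
                  (ih xs' hlen).2 acc (t ++ ' ' :: pvStrips x) (by simp)]
              rw [pv_join_glue]
              simp only [List.takeWhile_cons, List.dropWhile_cons, h, if_true, List.map_cons]
              rw [PySem.Chars.join_cons_cons]
              simp
            · have hstep : pvStepA (acc, t) x =
                  (acc ++ [String.mk t, String.mk (pvStrips x)], []) := by
                simp [pvStepA, h, ht]
              rw [List.foldl_cons, hstep,
                  (ih xs' hlen).1 (acc ++ [String.mk t, String.mk (pvStrips x)])]
              simp [pvAltGo, h, PySem.Chars.join_singleton]

-- ===== VERDICT (by name: the statement is the Claim_ definition above) =====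
theorem merge_exception_lines_spec : Claim_equal_merge_exception_lines := by
  intro log_lines _
  unfold Spec_merge_exception_lines merge_exception_lines merge_exception_lines_alt
  simpa using (pv_main log_lines.length log_lines le_rfl).1 []
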